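-- pv_equiv track=rewrite | github.com/M4rtinR/Robot-Interface-for-Robotic-Exercise-Coach | ListIndexesTest.py | countCats
-- ===== SOURCE A (Python) =====
-- def countCats(category, thisList):
--     count = 0
--     for element in thisList:
--         if category == 0:
--             if element < 5:
--                 count += 1
--         elif category == 1:
--             if element < 10 and element > 4:
--                 count += 1
--         else:
--             if element > 9:
--                 count += 1
--
--     return count
-- ===== SOURCE B (Python) =====
-- def countCats(category, thisList):
--     # Sort once, then binary-search the two boundaries and answer by rank arithmetic.
--     s = sorted(thisList)
--
--     def bisect_left(a, x):
--         lo, hi = 0, len(a)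
--         while lo < hi:
--             mid = (lo + hi) // 2
--             if a[mid] < x:
--                 lo = mid + 1
--             else:
--                 hi = mid
--         return lo
--
--     i5 = bisect_left(s, 5)    # number of elements < 5
--     i10 = bisect_left(s, 10)  # number of elements < 10
--     if category == 0:
--         return i5
--     if category == 1:
--         return i10 - i5
--     return len(s) - i10
-- ===== Notes on version B (the rewrite author's own statement) =====
-- stated objective: alternative
-- what changed: Instead of a per-element counting loop with a category branch, B sorts the list once and binary-searches the boundary values 5 and 10 (bisect_left), answering every category from the two ranks: i5, i10-i5, or len-i10.
import Mathlib
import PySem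

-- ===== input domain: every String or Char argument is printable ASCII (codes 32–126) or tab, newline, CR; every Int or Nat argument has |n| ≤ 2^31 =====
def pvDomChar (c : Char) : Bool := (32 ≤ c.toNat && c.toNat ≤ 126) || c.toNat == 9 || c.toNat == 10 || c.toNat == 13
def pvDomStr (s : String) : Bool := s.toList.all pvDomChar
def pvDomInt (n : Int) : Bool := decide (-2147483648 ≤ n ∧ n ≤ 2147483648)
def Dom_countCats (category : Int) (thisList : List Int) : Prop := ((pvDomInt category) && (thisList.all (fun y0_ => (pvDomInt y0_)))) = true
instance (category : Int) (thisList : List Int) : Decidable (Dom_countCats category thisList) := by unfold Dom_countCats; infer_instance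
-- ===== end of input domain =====

-- B replaces A's per-element counting loop by sort + binary search: it sorts the list once,
-- finds the ranks of the boundaries 5 and 10 with bisect_left, and answers each category
-- from rank arithmetic (alternative algorithm, same exact integer result).


-- ===== PORT A =====
-- literal transliteration: fold over the list, re-checking category in every iteration
def countCats (category : Int) (thisList : List Int) : Int :=
  thisList.foldl (fun count element =>
    if category == 0 then
      if element < 5 then count + 1 else count
    else if category == 1 then
      if element < 10 && element > 4 then count + 1 else count
    else
      if element > 9 then count + 1 else count) 0

-- ===== PORT B =====
-- sort once (sorted → PySem.List.sorted); the hand-written bisect_left lo/hi loop is exactly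
-- PySem.List.bisectLeft (same lo/hi halving loop); answers come from the two ranks
def countCats_alt (category : Int) (thisList : List Int) : Int :=
  let s := PySem.List.sorted thisList (fun x => x) false
  let i5 : Nat := PySem.List.bisectLeft s 5
  let i10 : Nat := PySem.List.bisectLeft s 10
  if category == 0 then (i5 : Int)
  else if category == 1 then (i10 : Int) - (i5 : Int)
  else (s.length : Int) - (i10 : Int)

-- ===== PRECONDITION & SPEC =====
def Spec_countCats (category : Int) (thisList : List Int) (out : Int) : Prop := out = countCats_alt category thisList
instance (category : Int) (thisList : List Int) (out : Int) : Decidable (Spec_countCats category thisList out) := by unfold Spec_countCats; infer_instance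

-- ===== CLAIM =====
def Claim_equal_countCats : Prop := ∀ (category : Int) (thisList : List Int), Dom_countCats category thisList → Spec_countCats category thisList (countCats category thisList)

-- ===== LEMMAS AND PROOFS =====

-- A counting fold with accumulator c equals c plus the number of satisfying elements.
theorem foldl_count (p : Int → Prop) [DecidablePred p] (l : List Int) (c : Int) :
    l.foldl (fun count e => if p e then count + 1 else count) c
      = c + (l.countP (fun e => decide (p e)) : Int) := by
  induction l generalizing c with
  | nil => simp
  | cons x xs ih =>
    simp only [List.foldl_cons, List.countP_cons]
    by_cases h : p x
    · rw [if_pos h, ih]; simp [h]; ring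
    · rw [if_neg h, ih]; simp [h]

-- On a sorted list, bisect_left's rank is exactly the count of elements below x.
theorem bisectLeft_eq_countP (s : List Int) (x : Int)
    (hs : s.Pairwise (fun a b => a ≤ b)) :
    PySem.List.bisectLeft s x = s.countP (fun e => decide (e < x)) := by
  obtain ⟨hle, hlt, hge⟩ := PySem.List.bisectLeft_spec s x hs
  set i := PySem.List.bisectLeft s x with hi
  have hsplit : s = s.take i ++ s.drop i := (List.take_append_drop i s).symm
  rw [hsplit, List.countP_append]
  have h1 : (s.take i).countP (fun e => decide (e < x)) = i := by
    rw [List.countP_eq_length.mpr]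
    · simp [Nat.min_eq_left hle]
    · intro a ha
      obtain ⟨j, hj, rfl⟩ := List.mem_take_iff_getElem.mp ha
      simp only [decide_eq_true_eq]
      exact hlt j (lt_of_lt_of_le (lt_min_iff.mp hj).1 hle) (lt_min_iff.mp hj).1
  have h2 : (s.drop i).countP (fun e => decide (e < x)) = 0 := by
    rw [List.countP_eq_zero]
    intro a ha
    obtain ⟨j, hj, rfl⟩ := List.mem_iff_getElem.mp ha
    rw [List.length_drop] at hj
    rw [List.getElem_drop]
    simp only [decide_eq_true_eq, not_lt]
    exact hge (i + j) (by omega) (by omega)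
  omega

-- countP is invariant under permutation; sorted is a permutation of the input.
theorem countP_sorted (l : List Int) (p : Int → Bool) :
    (PySem.List.sorted l (fun x => x) false).countP p = l.countP p :=
  (PySem.List.sorted_perm l (fun x => x) false).countP_eq p

-- integer-range decomposition: #(e<10) = #(e<5) + #(4<e<10)
theorem countP_split (l : List Int) :
    l.countP (fun e => decide (e < 10))
      = l.countP (fun e => decide (e < 5)) + l.countP (fun e => decide (e < 10) && decide (e > 4)) := by
  induction l with
  | nil => simp
  | cons a t ih =>
    simp only [List.countP_cons, ih]
    by_cases h5 : a < 5 <;> by_cases h10 : a < 10 <;>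
      simp [h5, h10, show (4 < a) ↔ ¬ a < 5 by omega] <;> omega

-- complement: #(e>9) = len − #(e<10) over the integers
theorem countP_compl (l : List Int) :
    l.countP (fun e => decide (e > 9)) = l.length - l.countP (fun e => decide (e < 10)) := by
  induction l with
  | nil => simp
  | cons a t ih =>
    have hc : t.countP (fun e => decide (e < 10)) ≤ t.length := List.countP_le_length
    simp only [List.countP_cons, List.length_cons, ih]
    by_cases h : a < 10 <;> simp [h, show (9 < a) ↔ ¬ a < 10 by omega] <;> try omega

-- ===== VERDICT =====
theorem countCats_spec : Claim_equal_countCats := by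
  intro category thisList _
  unfold Spec_countCats countCats countCats_alt
  simp only []
  have hs : (PySem.List.sorted thisList (fun x => x) false).Pairwise (fun a b => a ≤ b) := by
    simpa using PySem.List.sorted_pairwise thisList (fun x => x)
  rw [bisectLeft_eq_countP _ 5 hs, bisectLeft_eq_countP _ 10 hs,
      countP_sorted, countP_sorted, PySem.List.length_sorted]
  by_cases h0 : category == 0 <;> by_cases h1 : category == 1 <;>
    simp only [h0, h1, if_true, if_false, Bool.false_eq_true]
  · rw [foldl_count (fun e => e < 5)]; simp
  · rw [foldl_count (fun e => e < 5)]; simp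
  · rw [foldl_count (fun e => (decide (e < 10) && decide (e > 4)) = true)]
    have := countP_split thisList
    simp only [zero_add, Bool.decide_eq_true] at *
    omega
  · rw [foldl_count (fun e => e > 9)]
    have := countP_compl thisList
    have hc : thisList.countP (fun e => decide (e < 10)) ≤ thisList.length := List.countP_le_length
    simp only [zero_add]
    omega
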